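-- pv_equiv track=rewrite | github.com/ioflo/ioflo | ioflo/aid/aiding.py | reverseCamel
-- ===== SOURCE A (Python) =====
-- def reverseCamel(name, lower=True):
--     """ Returns camel case reverse of name.
--         case change boundaries are the sections which are reversed.
--         If lower is True then the initial letter in the reversed name is lower case
--
--         Assumes name is of the correct format to be Python Identifier.
--     """
--     index = 0
--     parts = [[]]
--     letters = list(name) # list of the letters in the name
--     for c in letters:
--         if c.isupper(): #new part
--             parts.append([])
--             index += 1
--         parts[index].append(c.lower())
--     parts.reverse()
--     parts = ["".join(part) for part in  parts]
--     if lower: #camel case with initial lower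
--         name = "".join(parts[0:1] + [part.capitalize() for part in parts[1:]])
--     else: #camel case with initial upper
--         name = "".join([part.capitalize() for part in parts])
--     return name
-- ===== SOURCE B (Python) =====
-- def _segments(name):
--     """Yield the camel segments of name: the (possibly empty) leading run of
--     non-uppercase characters, then one segment per uppercase letter."""
--     n = len(name)
--     j = 0
--     while j < n and not name[j].isupper():
--         j += 1
--     yield name[:j]
--     while j < n:
--         i, j = j, j + 1
--         while j < n and not name[j].isupper():
--             j += 1
--         yield name[i:j]
--
--
-- def reverseCamel(name, lower=True):
--     parts = [seg.lower() for seg in _segments(name)][::-1]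
--     rest = "".join(p.capitalize() for p in parts[1:])
--     return (parts[0] if lower else parts[0].capitalize()) + rest
-- ===== Notes on version B (the rewrite author's own statement) =====
-- stated objective: simpler
-- what changed: Replaces A's char-by-char loop that mutates a parts list through an index counter with a span-based tokenizer that slices whole camel segments (leading non-uppercase run, then one segment per uppercase letter), then lowercases, reverses and joins them.
import Mathlib
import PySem

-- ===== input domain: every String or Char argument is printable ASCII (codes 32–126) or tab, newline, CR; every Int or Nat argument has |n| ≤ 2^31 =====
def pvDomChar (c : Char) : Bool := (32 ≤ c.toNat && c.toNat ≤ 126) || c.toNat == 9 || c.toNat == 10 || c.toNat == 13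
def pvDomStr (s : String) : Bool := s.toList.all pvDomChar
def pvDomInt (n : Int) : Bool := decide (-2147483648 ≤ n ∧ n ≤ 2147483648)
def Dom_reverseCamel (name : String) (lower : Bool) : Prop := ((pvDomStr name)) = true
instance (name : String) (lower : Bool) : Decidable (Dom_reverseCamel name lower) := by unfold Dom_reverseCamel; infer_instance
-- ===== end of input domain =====

-- B replaces A's char-by-char loop (mutable parts list + index counter) by a span-based
-- tokenizer that slices out whole camel segments; same result, simpler decomposition.

-- ===== PORT A =====
-- Python str.capitalize(): first char uppercased, the rest lowercased (exact on ASCII).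
def pyCapitalizeA : List Char → List Char
  | [] => []
  | c :: cs => c.toUpper :: cs.map Char.toLower

-- one iteration of A's `for c in letters` loop; state = (parts, index)
def stepA (st : List (List Char) × Nat) (c : Char) : List (List Char) × Nat :=
  let st := if c.isUpper then (st.1 ++ [[]], st.2 + 1) else st
  (st.1.modify st.2 (· ++ [c.toLower]), st.2)

def reverseCamel (name : String) (lower : Bool) : String :=
  let letters := name.toList
  let st := letters.foldl stepA ([[]], 0)
  let parts := st.1.reverse
  if lower then
    String.mk ((parts.take 1 ++ (parts.drop 1).map pyCapitalizeA).flatten)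
  else
    String.mk ((parts.map pyCapitalizeA).flatten)

-- ===== PORT B =====
-- Python str.capitalize() for B's side (exact on ASCII).
def pyCapitalizeB : List Char → List Char
  | [] => []
  | c :: cs => c.toUpper :: cs.map Char.toLower

-- B's `_segments` inner loop: one segment per uppercase letter (the leading run is handled
-- by the caller).  Each step takes an uppercase head and its run of non-uppercase followers.
def segsB : List Char → List (List Char)
  | [] => []
  | c :: rest =>
      (c :: rest.takeWhile (fun x => !x.isUpper)) :: segsB (rest.dropWhile (fun x => !x.isUpper))
termination_by cs => cs.length
decreasing_by
  simpa using Nat.lt_succ_of_le (List.length_dropWhile_le _ rest)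

def reverseCamel_alt (name : String) (lower : Bool) : String :=
  let cs := name.toList
  let segs := cs.takeWhile (fun x => !x.isUpper) :: segsB (cs.dropWhile (fun x => !x.isUpper))
  let parts := (segs.map (fun s => s.map Char.toLower)).reverse
  match parts with
  | [] => ""   -- unreachable: segs is nonempty
  | p :: ps =>
      let rest := (ps.map pyCapitalizeB).flatten
      String.mk ((if lower then p else pyCapitalizeB p) ++ rest)

-- ===== PRECONDITION & SPEC =====
def Spec_reverseCamel (name : String) (lower : Bool) (out : String) : Prop := out = reverseCamel_alt name lower
instance (name : String) (lower : Bool) (out : String) : Decidable (Spec_reverseCamel name lower out) := by unfold Spec_reverseCamel; infer_instance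

-- ===== CLAIM (what is proved, stated in full; the proofs are below) =====
def Claim_equal_reverseCamel : Prop := ∀ (name : String) (lower : Bool), Dom_reverseCamel name lower → Spec_reverseCamel name lower (reverseCamel name lower)

-- ===== LEMMAS AND PROOFS =====

theorem pyCapitalize_AB : pyCapitalizeA = pyCapitalizeB := by
  funext cs; cases cs <;> rfl

theorem modify_append_last {α : Type} (ps : List α) (p : α) (f : α → α) :
    (ps ++ [p]).modify ps.length f = ps ++ [f p] := by
  simp [List.modify_eq_set_getElem?]

-- Invariant of A's loop: starting from finished parts `ps` and current part `p`
-- (with index = ps.length), the fold produces exactly the span decomposition of cs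
-- (lowercased), glued onto p.
theorem foldA_eq (cs : List Char) : ∀ (ps : List (List Char)) (p : List Char),
    cs.foldl stepA (ps ++ [p], ps.length) =
      (ps ++ (p ++ (cs.takeWhile (fun x => !x.isUpper)).map Char.toLower)
          :: (segsB (cs.dropWhile (fun x => !x.isUpper))).map (fun s => s.map Char.toLower),
       ps.length + (segsB (cs.dropWhile (fun x => !x.isUpper))).length) := by
  induction cs with
  | nil => intro ps p; simp [segsB]
  | cons c cs ih =>
      intro ps p
      by_cases hc : c.isUpper
      · have h2 : (ps ++ [p, ([] : List Char)]).modify (ps.length + 1) (fun x => x ++ [c.toLower])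
            = ps ++ [p, [c.toLower]] := by
          simpa using modify_append_last (ps ++ [p]) [] (fun x => x ++ [c.toLower])
        have h1 : (c :: cs).foldl stepA (ps ++ [p], ps.length)
            = cs.foldl stepA ((ps ++ [p]) ++ [[c.toLower]], (ps ++ [p]).length) := by
          simp only [List.foldl_cons, stepA, hc, ite_true]
          simp only [List.append_assoc, List.cons_append, List.nil_append, h2,
            List.length_append, List.length_cons, List.length_nil]
        rw [h1, ih (ps ++ [p]) [c.toLower]]
        simp [hc, segsB]
        omega
      · have h1 : (c :: cs).foldl stepA (ps ++ [p], ps.length)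
            = cs.foldl stepA (ps ++ [p ++ [c.toLower]], ps.length) := by
          simp [List.foldl_cons, stepA, hc, modify_append_last ps p (· ++ [c.toLower])]
        rw [h1, ih ps (p ++ [c.toLower])]
        simp [hc]

theorem reverseCamel_eq_alt (name : String) (lower : Bool) :
    reverseCamel name lower = reverseCamel_alt name lower := by
  have h := foldA_eq name.toList [] []
  simp only [List.nil_append, List.length_nil] at h
  simp only [reverseCamel, reverseCamel_alt, h]
  set L := (name.toList.takeWhile (fun x => !x.isUpper)).map Char.toLower with hL
  set S := (segsB (name.toList.dropWhile (fun x => !x.isUpper))).map (fun s => s.map Char.toLower) with hS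
  simp only [List.map_cons, List.reverse_cons]
  -- both sides now talk about (L :: S).reverse = S.reverse ++ [L]
  rcases hrev : S.reverse ++ [L] with _ | ⟨q, qs⟩
  · exact absurd hrev (by simp)
  · cases lower <;> simp [pyCapitalize_AB]

-- ===== VERDICT (by name: the statement is the Claim_ definition above) =====
theorem reverseCamel_spec : Claim_equal_reverseCamel := by
  intro name lower _
  unfold Spec_reverseCamel
  exact reverseCamel_eq_alt name lower
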